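-- pv_equiv track=rewrite | github.com/HyeJiRoh/Algorithm | 프로그래머스/unrated/181874. A 강조하기/A 강조하기.py | solution
-- ===== SOURCE A (Python) =====
-- def solution(myString):
--     answer = ''
--     for word in myString:
--         if word == "a" or word == "A":
--             answer += "A"
--         else:
--             answer += word.lower()
--     return answer
-- ===== SOURCE B (Python) =====
-- def solution(myString):
--     return myString.lower().replace('a', 'A')
-- ===== Notes on version B (the rewrite author's own statement) =====
-- stated objective: idiomatic
-- what changed: Replaces the per-character branch-and-accumulate loop with two whole-string sweeps: lowercase everything, then replace every 'a' with 'A' ('A' is the only character whose lowercase is 'a').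
import Mathlib
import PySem

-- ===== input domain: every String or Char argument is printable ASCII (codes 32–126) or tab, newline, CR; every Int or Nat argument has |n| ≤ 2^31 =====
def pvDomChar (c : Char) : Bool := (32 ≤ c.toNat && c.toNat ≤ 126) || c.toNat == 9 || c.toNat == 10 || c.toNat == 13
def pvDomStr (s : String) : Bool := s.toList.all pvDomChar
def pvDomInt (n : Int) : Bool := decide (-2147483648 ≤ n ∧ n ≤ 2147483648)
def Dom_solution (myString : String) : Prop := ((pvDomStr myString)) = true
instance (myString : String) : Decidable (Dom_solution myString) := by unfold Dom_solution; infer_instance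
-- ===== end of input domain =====

-- B lowercases the whole string in one sweep and then replaces every 'a' by 'A',
-- instead of A's per-character branch-and-accumulate loop (idiomatic two-pass form).

-- ===== PORT A =====
-- the loop body: 'a'/'A' append "A", anything else appends its lowercase
def pvStep (answer : String) (word : Char) : String :=
  if word == 'a' || word == 'A' then answer ++ "A"
  else answer ++ PySem.Str.lower (String.ofList [word])

-- per-character loop of A, accumulating into answer
def solution (myString : String) : String :=
  myString.toList.foldl pvStep ""

-- ===== PORT B =====
def solution_alt (myString : String) : String :=
  PySem.Str.replace (PySem.Str.lower myString) "a" "A"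

-- ===== PRECONDITION & SPEC =====
def Spec_solution (myString : String) (out : String) : Prop := out = solution_alt myString
instance (myString : String) (out : String) : Decidable (Spec_solution myString out) := by unfold Spec_solution; infer_instance

-- ===== CLAIM (what is proved, stated in full; the proofs are below) =====
def Claim_equal_solution : Prop := ∀ (myString : String), Dom_solution myString → Spec_solution myString (solution myString)

-- ===== LEMMAS AND PROOFS =====

-- A's per-character transformation
def pvStepA (c : Char) : Char := if c == 'a' || c == 'A' then 'A' else PySem.Chars.lowerChar c
-- B's replace step on the lowered string
def pvRepl (c : Char) : Char := if c == 'a' then 'A' else c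

lemma foldA_toList (l : List Char) (acc : String) :
    (l.foldl pvStep acc).toList = acc.toList ++ l.map pvStepA := by
  induction l generalizing acc with
  | nil => simp
  | cons c t ih =>
    rw [List.foldl_cons, ih]
    by_cases h : c = 'a' ∨ c = 'A'
    · simp [pvStep, pvStepA, h]
    · simp [pvStep, pvStepA, h, PySem.Chars.lower]

lemma go_spec (fuel : Nat) (l acc : List Char) :
    PySem.Chars.replace.go ['a'] ['A'] fuel l acc
      = acc.reverse ++ (l.take fuel).map pvRepl ++ l.drop fuel := by
  induction fuel generalizing l acc with
  | zero => rw [PySem.Chars.replace.go]; simp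
  | succ n ih =>
    cases l with
    | nil =>
      rw [PySem.Chars.replace.go]
      simp
      all_goals omega
    | cons c t =>
      rw [PySem.Chars.replace.go]
      by_cases h : c = 'a'
      · subst h
        simp [List.isPrefixOf, ih, pvRepl]
      · have hp : List.isPrefixOf ['a'] (c :: t) = false := by
          simp [List.isPrefixOf]; exact fun h' => (h h'.symm).elim
        simp [hp, ih, pvRepl, h]

lemma replace_single (l : List Char) :
    PySem.Chars.replace l ['a'] ['A'] = l.map pvRepl := by
  rw [PySem.Chars.replace]
  simp [go_spec]

lemma lowerChar_ne_a {c : Char} (hA : c ≠ 'A') (ha : c ≠ 'a') :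
    PySem.Chars.lowerChar c ≠ 'a' := by
  unfold PySem.Chars.lowerChar PySem.Chars.isupper
  split
  · rename_i hup
    have h1 : 'A' ≤ c := by simpa using (Bool.and_elim_left hup)
    have h2 : c ≤ 'Z' := by simpa using (Bool.and_elim_right hup)
    have hb1 : 65 ≤ c.toNat := h1
    have hb2 : c.toNat ≤ 90 := h2
    intro heq
    have hval : Nat.isValidChar (c.toNat + 32) := Or.inl (by omega)
    have h97 : (Char.ofNat (c.toNat + 32)).toNat = 97 := by rw [heq]; rfl
    rw [Char.toNat_ofNat] at h97
    rw [if_pos hval] at h97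
    have hc : c.toNat = 65 := by omega
    have hcc : c.toNat = ('A' : Char).toNat := by rw [hc]; rfl
    exact hA (Char.ext (UInt32.toNat_inj.mp hcc))
  · exact ha

lemma key (c : Char) : pvRepl (PySem.Chars.lowerChar c) = pvStepA c := by
  unfold pvRepl pvStepA
  by_cases hA : c = 'A'
  · subst hA; decide
  · by_cases ha : c = 'a'
    · subst ha; decide
    · simp [hA, ha, lowerChar_ne_a hA ha]

-- ===== VERDICT (by name: the statement is the Claim_ definition above) =====
theorem solution_spec : Claim_equal_solution := by
  intro s _
  unfold Spec_solution solution solution_alt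
  apply String.toList_inj.mp
  rw [foldA_toList]
  simp [replace_single, PySem.Chars.lower, Function.comp, key]
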